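-- pv_equiv track=rewrite | github.com/lexmarcos/tourney-test | tourney_site/views/home.py | get_tournament_config
-- ===== SOURCE A (Python) =====
-- def get_tournament_config(players):
--     i = 0
--     while 2**i < len(players):
--         i+=1
--     byes = (2**i) - len(players)
--
--     return {
--         "byes": byes,
--         "rounds": i,
--     }
-- ===== SOURCE B (Python) =====
-- def get_tournament_config(players):
--     n = len(players)
--     rounds = (n - 1).bit_length() if n >= 2 else 0
--     return {
--         "byes": (1 << rounds) - n,
--         "rounds": rounds,
--     }
-- ===== Notes on version B (the rewrite author's own statement) =====
-- stated objective: idiomatic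
-- what changed: Replaces the doubling while-loop with a closed-form bit_length computation (rounds = (n-1).bit_length() for n >= 2, else 0) and a shift for the bracket size.
import Mathlib
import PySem

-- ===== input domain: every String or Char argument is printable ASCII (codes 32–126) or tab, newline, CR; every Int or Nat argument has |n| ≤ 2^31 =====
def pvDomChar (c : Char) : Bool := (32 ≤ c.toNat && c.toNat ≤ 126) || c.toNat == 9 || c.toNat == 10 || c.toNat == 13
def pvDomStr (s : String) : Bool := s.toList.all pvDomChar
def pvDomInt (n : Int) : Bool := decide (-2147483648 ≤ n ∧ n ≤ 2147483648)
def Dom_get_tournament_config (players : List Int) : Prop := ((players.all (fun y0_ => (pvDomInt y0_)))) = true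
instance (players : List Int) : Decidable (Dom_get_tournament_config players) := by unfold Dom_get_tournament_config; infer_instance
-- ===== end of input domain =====

-- B replaces A's doubling while-loop by a closed-form bit-length computation (idiomatic, O(1)).


-- ===== PORT A =====
-- A's while loop: increment i while 2**i < n.
def pvWhileA (n i : Nat) : Nat :=
  if 2 ^ i < n then pvWhileA n (i + 1) else i
termination_by n - 2 ^ i
decreasing_by
  have h : 2 ^ i < 2 ^ (i + 1) := Nat.pow_lt_pow_right (by norm_num) (Nat.lt_succ_self i)
  omega

def get_tournament_config (players : List Int) : List (String × Int) :=
  let i := pvWhileA players.length 0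
  let byes : Int := (2 : Int) ^ i - (players.length : Int)
  [("byes", byes), ("rounds", (i : Int))]

-- ===== PORT B =====
-- (n-1).bit_length() for n ≥ 2 is Nat.size (n-1); 1 << rounds is 2 ^ rounds.
def get_tournament_config_alt (players : List Int) : List (String × Int) :=
  let n := players.length
  let rounds : Nat := if 2 ≤ n then Nat.size (n - 1) else 0
  [("byes", ((2 : Int) ^ rounds - (n : Int))), ("rounds", (rounds : Int))]

-- ===== PRECONDITION & SPEC =====
def Spec_get_tournament_config (players : List Int) (out : List (String × Int)) : Prop := out = get_tournament_config_alt players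
instance (players : List Int) (out : List (String × Int)) : Decidable (Spec_get_tournament_config players out) := by unfold Spec_get_tournament_config; infer_instance

-- ===== CLAIM (what is proved, stated in full; the proofs are below) =====
def Claim_equal_get_tournament_config : Prop := ∀ (players : List Int), Dom_get_tournament_config players → Spec_get_tournament_config players (get_tournament_config players)

-- ===== LEMMAS AND PROOFS =====

-- From any start i ≤ Nat.size (n-1), the loop lands exactly at Nat.size (n-1) (for n ≥ 2).
theorem pvWhileA_reaches (n : Nat) (hn : 2 ≤ n) :
    ∀ k i, Nat.size (n - 1) - i ≤ k → i ≤ Nat.size (n - 1) → pvWhileA n i = Nat.size (n - 1) := by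
  intro k
  induction k with
  | zero =>
    intro i hk hi
    have hie : i = Nat.size (n - 1) := by omega
    subst hie
    rw [pvWhileA]
    have h1 : n - 1 < 2 ^ Nat.size (n - 1) := Nat.lt_size_self _
    have : ¬ 2 ^ Nat.size (n - 1) < n := by omega
    simp [this]
  | succ k ih =>
    intro i hk hi
    rcases Nat.lt_or_ge i (Nat.size (n - 1)) with hlt | hge
    · have h2 : 2 ^ i ≤ n - 1 := Nat.lt_size.mp hlt
      have hc : 2 ^ i < n := by omega
      rw [pvWhileA]
      simp only [hc, if_true]
      exact ih (i + 1) (by omega) (by omega)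
    · have hie : i = Nat.size (n - 1) := by omega
      subst hie
      rw [pvWhileA]
      have h1 : n - 1 < 2 ^ Nat.size (n - 1) := Nat.lt_size_self _
      have : ¬ 2 ^ Nat.size (n - 1) < n := by omega
      simp [this]

theorem pvWhileA_eq (n : Nat) : pvWhileA n 0 = if 2 ≤ n then Nat.size (n - 1) else 0 := by
  split
  · next hn => exact pvWhileA_reaches n hn (Nat.size (n - 1)) 0 (by omega) (by omega)
  · next hn =>
    rw [pvWhileA]
    have h0 : ¬ 2 ^ 0 < n := by omega
    simp only [h0, if_false]

-- ===== VERDICT (by name: the statement is the Claim_ definition above) =====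
theorem get_tournament_config_spec : Claim_equal_get_tournament_config := by
  intro players _
  unfold Spec_get_tournament_config get_tournament_config get_tournament_config_alt
  simp only [pvWhileA_eq]
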